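-- pv_equiv track=rewrite | github.com/LiJiaxin888/VQGE | package/vqgespy/utils.py | bitwise_difference
-- ===== SOURCE A (Python) =====
-- def bitwise_difference(i, j, bit_count):
--     """
--     Generate an array of length bit_count, where each element indicates whether the corresponding bits of i and j differ.
--
--     Parameters:
--     i (int): Unsigned integer input i.
--     j (int): Unsigned integer input j.
--     bit_count (int): Number of bits to consider.
--
--     Returns:
--     list: An array of length bit_count. 0 indicates the bits are identical, 1 indicates the bits differ.
--     """
--     if i < 0 or j < 0:
--         raise ValueError("Inputs i and j must be non-negative integers.")
--
--     if bit_count <= 0: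
--         raise ValueError("bit_count must be a positive integer.")
--
--     result = []
--     for k in range(bit_count):
--         bit_i = (i >> k) & 1
--         bit_j = (j >> k) & 1
--         # Append 1 if different, otherwise 0
--         result.append(1 if bit_i != bit_j else 0)
--
--     return result[::-1]  # Reverse to make the array match binary representation order
-- ===== SOURCE B (Python) =====
-- def bitwise_difference(i, j, bit_count):
--     if i < 0 or j < 0:
--         raise ValueError("Inputs i and j must be non-negative integers.")
--
--     if bit_count <= 0:
--         raise ValueError("bit_count must be a positive integer.")
--
--     def go(x, n):
--         # n-digit binary expansion of x mod 2**n, MSB first, by divide and conquer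
--         if n == 1:
--             return [x % 2]
--         m = n // 2
--         q, r = divmod(x, 1 << m)
--         return go(q, n - m) + go(r, m)
--
--     return go(i ^ j, bit_count)
-- ===== Notes on version B (the rewrite author's own statement) =====
-- stated objective: alternative
-- what changed: B XORs the inputs once and computes the fixed-width binary expansion of that single number by divide and conquer: one divmod by 2**(n//2) splits it into high and low halves whose expansions are concatenated (MSB-first directly), replacing A's indexed loop that shifts and masks both numbers at every bit position, compares, appends, and finally reverses the list.
import Mathlib
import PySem

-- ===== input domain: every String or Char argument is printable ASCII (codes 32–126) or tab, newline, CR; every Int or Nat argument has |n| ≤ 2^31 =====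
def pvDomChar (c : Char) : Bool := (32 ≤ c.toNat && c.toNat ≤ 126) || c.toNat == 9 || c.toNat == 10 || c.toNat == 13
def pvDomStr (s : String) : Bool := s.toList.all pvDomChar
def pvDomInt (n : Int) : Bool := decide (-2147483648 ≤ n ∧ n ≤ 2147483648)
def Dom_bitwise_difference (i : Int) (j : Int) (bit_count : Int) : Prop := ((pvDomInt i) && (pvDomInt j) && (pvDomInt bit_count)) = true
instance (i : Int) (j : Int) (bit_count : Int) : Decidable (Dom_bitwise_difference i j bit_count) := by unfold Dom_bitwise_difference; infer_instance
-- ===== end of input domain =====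

-- B XORs once and takes the fixed-width binary expansion of that single number by recursive
-- divmod halving (MSB-first by appending after the recursive call), instead of A's indexed
-- shift-and-mask loop over both numbers plus a final reversal (objective: alternative).

-- ===== PORT A =====
def bitwise_difference (i : Int) (j : Int) (bit_count : Int) : List Int :=
  let result : List Int := (PySem.List.pyRange 0 bit_count 1).foldl
    (fun result k =>
      let bit_i := PySem.Int.band (i >>> k.toNat) 1
      let bit_j := PySem.Int.band (j >>> k.toNat) 1
      result ++ [if bit_i ≠ bit_j then 1 else 0]) []
  (PySem.List.slice? result none none (-1)).getD []  -- result[::-1]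

-- ===== PORT B =====
-- inner helper go(x, n): divide and conquer on the width n (always called with 1 <= n;
-- the n = 0 case, unreachable from the entry point, is folded into the base case for totality)
def bdGo (x : Int) (n : Nat) : List Int :=
  if n ≤ 1 then [PySem.Int.mod x 2]
  else
    let m := n / 2
    let q := PySem.Int.floordiv x ((1 : Int) <<< m)
    let r := PySem.Int.mod x ((1 : Int) <<< m)
    bdGo q (n - m) ++ bdGo r m
  decreasing_by all_goals omega

def bitwise_difference_alt (i : Int) (j : Int) (bit_count : Int) : List Int :=
  bdGo (PySem.Int.bxor i j) bit_count.toNat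

-- ===== PRECONDITION & SPEC =====
-- Pre_ excludes exactly the inputs on which A raises ValueError (negative i or j, or bit_count ≤ 0).
def Pre_bitwise_difference (i : Int) (j : Int) (bit_count : Int) : Prop :=
  0 ≤ i ∧ 0 ≤ j ∧ 0 < bit_count
instance (i : Int) (j : Int) (bit_count : Int) : Decidable (Pre_bitwise_difference i j bit_count) := by
  unfold Pre_bitwise_difference; infer_instance

def pvWitness_bitwise_difference : Int × Int × Int := (6, 3, 4)

def Spec_bitwise_difference (i : Int) (j : Int) (bit_count : Int) (out : List Int) : Prop := out = bitwise_difference_alt i j bit_count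
instance (i : Int) (j : Int) (bit_count : Int) (out : List Int) : Decidable (Spec_bitwise_difference i j bit_count out) := by unfold Spec_bitwise_difference; infer_instance

-- ===== CLAIM (what is proved, stated in full; the proofs are below) =====
def Claim_equal_bitwise_difference : Prop := ∀ (i : Int) (j : Int) (bit_count : Int), Dom_bitwise_difference i j bit_count → Pre_bitwise_difference i j bit_count → Spec_bitwise_difference i j bit_count (bitwise_difference i j bit_count)

-- ===== LEMMAS AND PROOFS =====

-- the k-th bit of a XOR b, as a Nat: 1 iff the k-th bits of a and b differ
lemma xor_bit_eq (a b m : Nat) :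
    ((a ^^^ b) >>> m) &&& 1 = if (a >>> m) &&& 1 ≠ (b >>> m) &&& 1 then 1 else 0 := by
  have h := Nat.testBit_xor a b m
  simp only [Nat.testBit, Nat.and_one_is_mod] at *
  rcases Nat.mod_two_eq_zero_or_one (a >>> m) with ha | ha <;>
    rcases Nat.mod_two_eq_zero_or_one (b >>> m) with hb | hb <;>
      simp [Nat.shiftRight_xor_distrib, ha, hb] at h ⊢ <;> omega

-- low bits are unchanged by mod 2^m
lemma bit_mod_pow (x m k : Nat) (hk : k < m) :
    ((x % 2 ^ m) >>> k) &&& 1 = (x >>> k) &&& 1 := by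
  have h := Nat.testBit_mod_two_pow x m k
  simp only [Nat.testBit, hk, decide_true, Bool.true_and] at h
  rcases Nat.mod_two_eq_zero_or_one ((x % 2 ^ m) >>> k) with h1 | h1 <;>
    rcases Nat.mod_two_eq_zero_or_one (x >>> k) with h2 | h2 <;>
      simp [h1, h2] at h ⊢

-- (1 : Int) <<< m is the cast of the Nat power 2^m
lemma one_shl_eq (m : Nat) : ((1 : Int) <<< m) = ((2 ^ m : Nat) : Int) := by
  rw [Int.shiftLeft_eq]
  push_cast
  ring

-- bdGo on a Nat-cast argument is the MSB-first list of the n low bits (for 1 ≤ n)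
lemma bdGo_eq_bits (n : Nat) (hn : 1 ≤ n) : ∀ (x : Nat),
    bdGo (x : Int) n = ((List.range n).map (fun k => (((x >>> k) &&& 1 : Nat) : Int))).reverse := by
  induction n using Nat.strong_induction_on with
  | _ n ih =>
    intro x
    rw [bdGo]
    by_cases h1 : n ≤ 1
    · have hn1 : n = 1 := by omega
      subst hn1
      simp [Nat.and_one_is_mod]
    · simp only [h1, if_false]
      have hm1 : 1 ≤ n / 2 := by omega
      have hm2 : n / 2 < n := by omega
      have hnm1 : 1 ≤ n - n / 2 := by omega
      have hnm2 : n - n / 2 < n := by omega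
      rw [one_shl_eq]
      have hq : PySem.Int.floordiv (x : Int) ((2 ^ (n / 2) : Nat) : Int)
          = ((x / 2 ^ (n / 2) : Nat) : Int) := PySem.Int.floordiv_natCast x (2 ^ (n / 2))
      have hr : PySem.Int.mod (x : Int) ((2 ^ (n / 2) : Nat) : Int)
          = ((x % 2 ^ (n / 2) : Nat) : Int) := PySem.Int.mod_natCast x (2 ^ (n / 2))
      rw [hq, hr, ih (n - n / 2) hnm2 hnm1 (x / 2 ^ (n / 2)), ih (n / 2) hm2 hm1 (x % 2 ^ (n / 2))]
      rw [show n = n / 2 + (n - n / 2) by omega, List.range_add, List.map_append,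
        List.reverse_append, List.map_map]
      have hns : n / 2 + (n - n / 2) = n := by omega
      rw [hns]
      congr 1
      · refine congrArg List.reverse (List.map_congr_left fun k _ => ?_)
        simp only [Function.comp]
        congr 1
        rw [Nat.shiftRight_add, Nat.shiftRight_eq_div_pow x (n / 2)]
      · refine congrArg List.reverse (List.map_congr_left fun k hk => ?_)
        rw [List.mem_range] at hk
        exact congrArg _ (bit_mod_pow x (n / 2) k hk)

-- A's loop body equals the XOR-bit, on nonnegative inputs
lemma body_eq (a b m : Nat) :
    (if PySem.Int.band ((a : Int) >>> ((m : Nat) : Int)) 1 ≠ PySem.Int.band ((b : Int) >>> ((m : Nat) : Int)) 1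
       then (1 : Int) else 0) = ((((a ^^^ b) >>> m) &&& 1 : Nat) : Int) := by
  have hsh : ∀ (y : Nat), ((y : Int) >>> ((m : Nat) : Int)) = ((y >>> m : Nat) : Int) :=
    fun y => Int.shiftRight_natCast y m
  rw [hsh, hsh]
  have h1 : (1 : Int) = ((1 : Nat) : Int) := rfl
  rw [h1, PySem.Int.band_natCast, PySem.Int.band_natCast, xor_bit_eq a b m]
  push_cast
  simp only [ne_eq, Nat.cast_inj]

-- ===== VERDICT (by name: the statement is the Claim_ definition above) =====
theorem bitwise_difference_spec : Claim_equal_bitwise_difference := by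
  intro i j bit_count _ hpre
  obtain ⟨hi, hj, _⟩ := hpre
  obtain ⟨a, rfl⟩ := Int.eq_ofNat_of_zero_le hi
  obtain ⟨b, rfl⟩ := Int.eq_ofNat_of_zero_le hj
  unfold Spec_bitwise_difference bitwise_difference bitwise_difference_alt
  simp only [PySem.List.foldl_append_singleton_eq_map, PySem.List.slice?_none_none_neg_one,
    Option.getD_some, List.nil_append]
  have hn : 1 ≤ bit_count.toNat := by omega
  rw [PySem.Int.bxor_natCast, bdGo_eq_bits bit_count.toNat hn, PySem.List.pyRange_one]
  rw [List.map_map]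
  have h0 : (bit_count - 0).toNat = bit_count.toNat := by norm_num
  rw [h0]
  refine congrArg List.reverse (List.map_congr_left fun m _ => ?_)
  simp only [Function.comp]
  have hk : ((0 : Int) + (m : Int)).toNat = m := by simp
  rw [hk]
  exact body_eq a b m
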